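-- pv_equiv track=rewrite | github.com/collinsakenga/codewars_solutions | 5 kyu/5 kyu_Reversi row rudiments.py | reversi_row
-- ===== SOURCE A (Python) =====
-- def reversi_row(moves):
--     res=["."]*8
--     for i,j in enumerate(moves):
--         res[j]="*" if i%2==0 else "O"
--         first={k:-1 for k,l in enumerate(res) if l==["*", "O"][i%2==1]}
--         second=[k for k,l in enumerate(res) if l==["*", "O"][i%2==0]]
--         temp=[]
--         third=[]
--         for k in second:
--             if not temp:
--                 temp=[k]
--             elif k-temp[-1]==1:
--                 temp.append(k)
--             else:
--                 third.append(temp)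
--                 temp=[k]
--         third=third+[temp] if temp else third
--         for k in third:
--             if (j==min(k)-1 or j==max(k)+1) and first.get(min(k)-1, None) and first.get(max(k)+1, None):
--                 for l in range(min(k), max(k)+1):
--                     res[l]="*" if i%2==0 else "O"
--     return "".join(res)
-- ===== SOURCE B (Python) =====
-- def reversi_row(moves):
--     res = ["."] * 8
--     for i, j in enumerate(moves):
--         cur, opp = ("*", "O") if i % 2 == 0 else ("O", "*")
--         res[j] = cur
--         for step in (-1, 1):
--             k = j + step
--             while 0 <= k < 8 and res[k] == opp:
--                 k += step
--             if 0 <= k < 8 and res[k] == cur: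
--                 for l in range(min(j, k) + 1, max(j, k)):
--                     res[l] = cur
--     return "".join(res)
-- ===== Notes on version B (the rewrite author's own statement) =====
-- stated objective: simpler
-- what changed: Replaces A's per-move rebuild of an index dict, a list of opponent indices, and a run-grouping pass filtered by adjacency with a direct outward scan from the placed piece in each of the two directions, flipping the bracketed run in place.
-- outside the precondition, e.g. on reversi_row([-2, -8, 1, 4, -1]): A returns 'O*..O.**', B returns '**..O.**'; on reversi_row([-8, -1]): A returns '*......O', B returns '*......O'; on reversi_row([8]): A raises IndexError, B raises IndexError
import Mathlib
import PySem

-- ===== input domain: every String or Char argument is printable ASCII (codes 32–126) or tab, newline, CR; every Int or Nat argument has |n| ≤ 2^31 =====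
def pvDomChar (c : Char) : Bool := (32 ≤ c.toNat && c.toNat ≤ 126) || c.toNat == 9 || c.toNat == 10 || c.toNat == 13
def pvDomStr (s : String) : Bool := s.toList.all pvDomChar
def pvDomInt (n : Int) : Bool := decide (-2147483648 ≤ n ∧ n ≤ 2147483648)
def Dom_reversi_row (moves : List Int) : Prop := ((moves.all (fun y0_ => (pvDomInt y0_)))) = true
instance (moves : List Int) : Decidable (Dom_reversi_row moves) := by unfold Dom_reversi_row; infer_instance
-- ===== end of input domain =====

-- B replaces A's build-index/group-runs/filter-by-adjacency pass with a direct outward scan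
-- in each direction from the placed piece (objective: simpler).

-- ===== PORT A =====

-- Python truthiness of `first.get(x, None)`: None is falsy, an int is truthy iff nonzero (exact).
def pvTruthyOptInt (v : Option Int) : Bool :=
  match v with
  | none => false
  | some n => n != 0

-- `for l in range(lo, hi): res[l] = c` (indices are nonnegative wherever A runs it)
def pvFlipRange (c : Char) (res : List Char) (lo hi : Int) : List Char :=
  (PySem.List.pyRange lo hi 1).foldl (fun r l => r.set l.toNat c) res

-- body of A's `for i,j in enumerate(moves)` loop, with cur = ["*","O"][i%2==1], opp the other
def pvStepA (res : List Char) (c o : Char) (j : Int) : List Char :=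
  let jn : Nat := (if j < 0 then j + 8 else j).toNat   -- Python negative-index write res[j]=…
  let res1 := res.set jn c
  let first : PySem.Dict Int Int :=
    (PySem.List.enumerate res1).foldl
      (fun d p => if p.2 == c then d.insert p.1 (-1) else d) PySem.Dict.empty
  let second : List Int :=
    (PySem.List.enumerate res1).foldl
      (fun acc p => if p.2 == o then acc ++ [p.1] else acc) []
  let tt : List Int × List (List Int) :=
    second.foldl
      (fun st k =>
        if st.1.isEmpty then ([k], st.2)
        else if k - st.1.getLastD 0 == 1 then (st.1 ++ [k], st.2)
        else ([k], st.2 ++ [st.1]))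
      ([], [])
  let third : List (List Int) := if tt.1.isEmpty then tt.2 else tt.2 ++ [tt.1]
  third.foldl
    (fun r k =>
      let mn := (PySem.List.min? k (fun x => x)).getD 0
      let mx := (PySem.List.max? k (fun x => x)).getD 0
      if (j == mn - 1 || j == mx + 1)
          && pvTruthyOptInt (PySem.Dict.get? first (mn - 1))
          && pvTruthyOptInt (PySem.Dict.get? first (mx + 1))
      then pvFlipRange c r mn (mx + 1)
      else r)
    res1

def reversi_row (moves : List Int) : String :=
  String.mk
    ((PySem.List.enumerate moves).foldl
      (fun res p =>
        let c := if PySem.Int.mod p.1 2 == 0 then '*' else 'O'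
        let o := if PySem.Int.mod p.1 2 == 0 then 'O' else '*'
        pvStepA res c o p.2)
      (List.replicate 8 '.'))

-- ===== PORT B =====

-- `while 0 <= k < 8 and res[k] == opp: k += step` (fuel 9 strictly exceeds the 8-cell board)
def pvScanB (res : List Char) (o : Char) (step : Int) : Nat → Int → Int
  | 0, k => k
  | fuel + 1, k =>
    if (decide (0 ≤ k) && decide (k < 8)) && (res.getD k.toNat '.' == o)
    then pvScanB res o step fuel (k + step)
    else k

-- one direction of B's move loop: scan outward from j, flip the run if bracketed
def pvDirB (c o : Char) (j : Int) (r : List Char) (step : Int) : List Char :=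
  let k := pvScanB r o step 9 (j + step)
  if (decide (0 ≤ k) && decide (k < 8)) && (r.getD k.toNat '.' == c)
  then pvFlipRange c r (min j k + 1) (max j k)
  else r

-- body of B's move loop: place, then scan outward in each direction and flip the bracketed run
def pvStepB (res : List Char) (c o : Char) (j : Int) : List Char :=
  let jn : Nat := (if j < 0 then j + 8 else j).toNat
  let res1 := res.set jn c
  [(-1 : Int), 1].foldl (pvDirB c o j) res1

def reversi_row_alt (moves : List Int) : String :=
  String.mk
    ((PySem.List.enumerate moves).foldl
      (fun res p =>
        let c := if PySem.Int.mod p.1 2 == 0 then '*' else 'O'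
        let o := if PySem.Int.mod p.1 2 == 0 then 'O' else '*'
        pvStepB res c o p.2)
      (List.replicate 8 '.'))

-- ===== PRECONDITION & SPEC =====
-- Pre_ restricts moves to the board positions 0..7 (the task's natural domain): A raises
-- IndexError for a move of 8 or more (or below -8), and for a negative in-range move A's value
-- comes from Python's negative-index wraparound on the write while its adjacency test still
-- uses the raw negative index — an artefact of A's implementation, not reversi behaviour.
def Pre_reversi_row (moves : List Int) : Prop := ∀ j ∈ moves, 0 ≤ j ∧ j < 8
instance (moves : List Int) : Decidable (Pre_reversi_row moves) := by
  unfold Pre_reversi_row; infer_instance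

def pvWitness_reversi_row : List Int := [3, 4, 2, 5, 1]

def Spec_reversi_row (moves : List Int) (out : String) : Prop := out = reversi_row_alt moves
instance (moves : List Int) (out : String) : Decidable (Spec_reversi_row moves out) := by unfold Spec_reversi_row; infer_instance

-- ===== CLAIM (what is proved, stated in full; the proofs are below) =====
def Claim_equal_reversi_row : Prop := ∀ (moves : List Int), Dom_reversi_row moves → Pre_reversi_row moves → Spec_reversi_row moves (reversi_row moves)

-- ===== LEMMAS AND PROOFS =====

-- ---- proof-side names for the pieces of A's step (definitionally equal to the port) ----

def pvFirst (r : List Char) (c : Char) : PySem.Dict Int Int :=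
  (PySem.List.enumerate r).foldl
    (fun d p => if p.2 == c then d.insert p.1 (-1) else d) PySem.Dict.empty

def pvSecond (r : List Char) (o : Char) : List Int :=
  (PySem.List.enumerate r).foldl
    (fun acc p => if p.2 == o then acc ++ [p.1] else acc) []

def pvGStep (st : List Int × List (List Int)) (k : Int) : List Int × List (List Int) :=
  if st.1.isEmpty then ([k], st.2)
  else if k - st.1.getLastD 0 == 1 then (st.1 ++ [k], st.2)
  else ([k], st.2 ++ [st.1])

def pvThird (l : List Int) : List (List Int) :=
  let tt := l.foldl pvGStep ([], [])
  if tt.1.isEmpty then tt.2 else tt.2 ++ [tt.1]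

def pvCond (c : Char) (j : Int) (first : PySem.Dict Int Int) (t : List Int) : Bool :=
  let mn := (PySem.List.min? t (fun x => x)).getD 0
  let mx := (PySem.List.max? t (fun x => x)).getD 0
  (j == mn - 1 || j == mx + 1)
    && pvTruthyOptInt (PySem.Dict.get? first (mn - 1))
    && pvTruthyOptInt (PySem.Dict.get? first (mx + 1))

def pvFlipFold (c : Char) (j : Int) (first : PySem.Dict Int Int)
    (third : List (List Int)) (r : List Char) : List Char :=
  third.foldl
    (fun r t =>
      if pvCond c j first t
      then pvFlipRange c r ((PySem.List.min? t (fun x => x)).getD 0)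
             ((PySem.List.max? t (fun x => x)).getD 0 + 1)
      else r)
    r

theorem pvStepA_eq (res : List Char) (c o : Char) (j : Int) :
    pvStepA res c o j =
      pvFlipFold c j (pvFirst (res.set (if j < 0 then j + 8 else j).toNat c) c)
        (pvThird (pvSecond (res.set (if j < 0 then j + 8 else j).toNat c) o))
        (res.set (if j < 0 then j + 8 else j).toNat c) := by
  rfl

theorem pvStepB_eq (res : List Char) (c o : Char) (j : Int) :
    pvStepB res c o j =
      pvDirB c o j (pvDirB c o j (res.set (if j < 0 then j + 8 else j).toNat c) (-1)) 1 := by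
  rfl

-- ---- flips ----

theorem pv_foldl_set_length (c : Char) : ∀ (L : List Int) (r : List Char),
    (L.foldl (fun r l => r.set l.toNat c) r).length = r.length := by
  intro L
  induction L with
  | nil => intro r; rfl
  | cons a L ih => intro r; simpa using ih (r.set a.toNat c)

theorem pv_flip_length (c : Char) (r : List Char) (lo hi : Int) :
    (pvFlipRange c r lo hi).length = r.length := by
  unfold pvFlipRange
  exact pv_foldl_set_length c _ r

theorem pv_getD_set (l : List Char) (n : Nat) (a : Char) (i : Nat) :
    (l.set n a).getD i '.' = if n = i ∧ i < l.length then a else l.getD i '.' := by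
  simp only [List.getD_eq_getElem?_getD, List.getElem?_set]
  split_ifs with h1 h2 h3 h4 <;> simp_all <;> omega

theorem pv_flip_getD (c : Char) (r : List Char) (lo hi : Int) (h0 : 0 ≤ lo) (i : Nat) :
    (pvFlipRange c r lo hi).getD i '.' =
      if lo ≤ (i : Int) ∧ (i : Int) < hi ∧ i < r.length then c else r.getD i '.' := by
  by_cases hle : hi ≤ lo
  · unfold pvFlipRange
    rw [PySem.List.pyRange_one_eq_nil hle]
    simp only [List.foldl_nil]
    rw [if_neg (by omega)]
  · push_neg at hle
    generalize hn : (hi - lo).toNat = n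
    induction n generalizing hi with
    | zero => omega
    | succ n ih =>
      have h1 : lo ≤ hi - 1 := by omega
      have h2 : pvFlipRange c r lo hi = (pvFlipRange c r lo (hi - 1)).set (hi - 1).toNat c := by
        unfold pvFlipRange
        rw [show hi = (hi - 1) + 1 by ring, PySem.List.pyRange_one_succ_right h1,
          List.foldl_append]
        simp
      rw [h2, pv_getD_set, pv_flip_length]
      by_cases hcase : (hi - 1).toNat = i ∧ i < r.length
      · rw [if_pos hcase, if_pos (by omega)]
      · rw [if_neg hcase]
        by_cases hlo : hi - 1 ≤ lo
        · unfold pvFlipRange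
          rw [PySem.List.pyRange_one_eq_nil hlo]
          simp only [List.foldl_nil]
          rw [if_neg (by omega)]
        · push_neg at hlo
          rw [ih (hi - 1) hlo (by omega)]
          by_cases hin : lo ≤ (i : Int) ∧ (i : Int) < hi - 1 ∧ i < r.length
          · rw [if_pos hin, if_pos (by omega)]
          · rw [if_neg hin, if_neg (by omega)]

-- ---- scans ----

theorem pv_scanR (r : List Char) (o : Char) :
    ∀ (fuel : Nat) (k : Int), 0 ≤ k → k ≤ 8 → 8 ≤ k + fuel →
      k ≤ pvScanB r o 1 fuel k ∧ pvScanB r o 1 fuel k ≤ 8 ∧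
      (∀ x : Int, k ≤ x → x < pvScanB r o 1 fuel k → r.getD x.toNat '.' = o) ∧
      (pvScanB r o 1 fuel k = 8 ∨ r.getD (pvScanB r o 1 fuel k).toNat '.' ≠ o) := by
  intro fuel
  induction fuel with
  | zero =>
    intro k h0 h8 hf
    have hk : k = 8 := by omega
    subst hk
    refine ⟨le_refl _, le_refl _, ?_, Or.inl rfl⟩
    intro x hx1 hx2
    exact absurd hx2 (by simp [pvScanB]; omega)
  | succ n ih =>
    intro k h0 h8 hf
    rw [pvScanB]
    split
    · next hg =>
      simp only [Bool.and_eq_true, decide_eq_true_eq, beq_iff_eq] at hg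
      obtain ⟨⟨hg0, hg8⟩, hgo⟩ := hg
      obtain ⟨i1, i2, i3, i4⟩ := ih (k + 1) (by omega) (by omega) (by omega)
      refine ⟨by omega, i2, ?_, i4⟩
      intro x hx1 hx2
      by_cases hxk : x = k
      · subst hxk; exact hgo
      · exact i3 x (by omega) hx2
    · next hg =>
      simp only [Bool.and_eq_true, decide_eq_true_eq, beq_iff_eq, not_and] at hg
      refine ⟨le_refl _, h8, fun x hx1 hx2 => by omega, ?_⟩
      by_cases hk8 : k = 8
      · left; exact hk8
      · right
        intro ho
        exact hg ⟨by omega, by omega⟩ ho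

theorem pv_scanL (r : List Char) (o : Char) :
    ∀ (fuel : Nat) (k : Int), -1 ≤ k → k < 8 → k + 1 ≤ fuel →
      pvScanB r o (-1) fuel k ≤ k ∧ -1 ≤ pvScanB r o (-1) fuel k ∧
      (∀ x : Int, x ≤ k → pvScanB r o (-1) fuel k < x → r.getD x.toNat '.' = o) ∧
      (pvScanB r o (-1) fuel k = -1 ∨ r.getD (pvScanB r o (-1) fuel k).toNat '.' ≠ o) := by
  intro fuel
  induction fuel with
  | zero =>
    intro k h0 h8 hf
    have hk : k = -1 := by omega
    subst hk
    refine ⟨le_refl _, le_refl _, ?_, Or.inl rfl⟩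
    intro x hx1 hx2
    exact absurd hx2 (by simp [pvScanB]; omega)
  | succ n ih =>
    intro k h0 h8 hf
    rw [pvScanB]
    split
    · next hg =>
      simp only [Bool.and_eq_true, decide_eq_true_eq, beq_iff_eq] at hg
      obtain ⟨⟨hg0, hg8⟩, hgo⟩ := hg
      have heq : k + -1 = k - 1 := by ring
      rw [heq]
      obtain ⟨i1, i2, i3, i4⟩ := ih (k - 1) (by omega) (by omega) (by omega)
      refine ⟨by omega, i2, ?_, i4⟩
      intro x hx1 hx2
      by_cases hxk : x = k
      · subst hxk; exact hgo
      · exact i3 x (by omega) hx2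
    · next hg =>
      simp only [Bool.and_eq_true, decide_eq_true_eq, beq_iff_eq, not_and] at hg
      refine ⟨le_refl _, h0, fun x hx1 hx2 => by omega, ?_⟩
      by_cases hk0 : k = -1
      · left; exact hk0
      · right
        intro ho
        exact hg ⟨by omega, by omega⟩ ho

theorem pv_scanR_congr (r r' : List Char) (o : Char) (j : Int)
    (hagree : ∀ x : Int, j < x → r.getD x.toNat '.' = r'.getD x.toNat '.') :
    ∀ (fuel : Nat) (k : Int), j < k →
      pvScanB r o 1 fuel k = pvScanB r' o 1 fuel k := by
  intro fuel
  induction fuel with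
  | zero => intro k _; rfl
  | succ n ih =>
    intro k hk
    rw [pvScanB, pvScanB, hagree k hk]
    split
    · exact ih (k + 1) (by omega)
    · rfl

-- ---- first / second ----

theorem pv_first_aux (c : Char) :
    ∀ (rs : List Char) (s : Int) (d : PySem.Dict Int Int) (x : Int),
      pvTruthyOptInt (PySem.Dict.get?
        ((PySem.List.enumerate rs s).foldl
          (fun d p => if p.2 == c then d.insert p.1 (-1) else d) d) x) = true ↔
      ((∃ i : Nat, ∃ _ : i < rs.length, x = s + (i : Int) ∧ rs[i] = c) ∨
        pvTruthyOptInt (PySem.Dict.get? d x) = true) := by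
  intro rs
  induction rs with
  | nil =>
    intro s d x
    simp [PySem.List.enumerate_nil]
  | cons a rs ih =>
    intro s d x
    rw [PySem.List.enumerate_cons, List.foldl_cons]
    rw [ih (s + 1)]
    constructor
    · rintro (⟨i, hlt, hx, hget⟩ | hd)
      · exact Or.inl ⟨i + 1, by simpa using hlt, by push_cast; omega, by simpa using hget⟩
      · by_cases ha : (a == c) = true
        · rw [if_pos ha] at hd
          rw [PySem.Dict.get?_insert] at hd
          by_cases hxs : x = s
          · exact Or.inl ⟨0, by simp, by omega, by simpa using ha⟩
          · rw [if_neg hxs] at hd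
            exact Or.inr hd
        · rw [if_neg ha] at hd
          exact Or.inr hd
    · rintro (⟨i, hlt, hx, hget⟩ | hd)
      · cases i with
        | zero =>
          right
          have ha : (a == c) = true := by simpa using hget
          rw [if_pos ha, PySem.Dict.get?_insert, if_pos (by omega)]
          rfl
        | succ i =>
          left
          exact ⟨i, by simpa using hlt, by push_cast at hx ⊢; omega, by simpa using hget⟩
      · right
        by_cases ha : (a == c) = true
        · rw [if_pos ha, PySem.Dict.get?_insert]
          by_cases hxs : x = s
          · rw [if_pos hxs]; rfl
          · rw [if_neg hxs]; exact hd
        · rw [if_neg ha]; exact hd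

theorem pv_first_truthy (r : List Char) (c : Char) (x : Int) :
    pvTruthyOptInt (PySem.Dict.get? (pvFirst r c) x) = true ↔
      ∃ i : Nat, ∃ _ : i < r.length, x = (i : Int) ∧ r[i] = c := by
  unfold pvFirst
  rw [pv_first_aux c r 0 PySem.Dict.empty x]
  simp [PySem.Dict.get?_empty, pvTruthyOptInt]

theorem pv_second_eq (r : List Char) (o : Char) :
    pvSecond r o = ((PySem.List.enumerate r).filter (fun p => p.2 == o)).map (·.1) := by
  unfold pvSecond
  rw [PySem.List.foldl_append_if]
  simp

theorem pv_second_mem (r : List Char) (o : Char) (x : Int) :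
    x ∈ pvSecond r o ↔ ∃ i : Nat, ∃ _ : i < r.length, x = (i : Int) ∧ r[i] = o := by
  rw [pv_second_eq]
  simp only [List.mem_map, List.mem_filter, PySem.List.mem_enumerate_iff]
  constructor
  · rintro ⟨p, ⟨⟨k, hk, rfl⟩, ho⟩, rfl⟩
    exact ⟨k, hk, by push_cast; omega, by simpa using ho⟩
  · rintro ⟨i, hlt, hx, hget⟩
    exact ⟨((i : Int), r[i]), ⟨⟨i, hlt, by norm_num⟩, by simpa using hget⟩, by omega⟩

theorem pv_second_sorted (r : List Char) (o : Char) :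
    (pvSecond r o).Pairwise (· < ·) := by
  rw [pv_second_eq]
  refine List.Pairwise.map _ ?_ (List.Pairwise.filter _ (PySem.List.pairwise_lt_enumerate r 0))
  exact fun a b h => h


-- ---- run grouping ----

theorem pv_pyRange_isEmpty_false (a m : Int) (h : a ≤ m) :
    (PySem.List.pyRange a (m + 1) 1).isEmpty = false := by
  rw [PySem.List.pyRange_one_cons (by omega)]
  rfl

theorem pv_pyRange_getLastD (a m : Int) (h : a ≤ m) :
    (PySem.List.pyRange a (m + 1) 1).getLastD 0 = m := by
  rw [PySem.List.pyRange_one_succ_right (by omega)]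
  exact List.getLastD_concat

def pvRunOf (l : List Int) (t : List Int) : Prop :=
  ∃ a b : Int, a ≤ b ∧ t = PySem.List.pyRange a (b + 1) 1 ∧
    (∀ x : Int, a ≤ x → x ≤ b → x ∈ l) ∧ (a - 1) ∉ l ∧ (b + 1) ∉ l

theorem pv_g_aux (l : List Int) (hs : l.Pairwise (· < ·)) :
    ∀ (rest pre : List Int) (a m : Int) (th : List (List Int)),
      l = pre ++ rest →
      a ≤ m → m ∈ pre →
      (∀ x : Int, a ≤ x → x ≤ m → x ∈ l) →
      (a - 1) ∉ l →
      (∀ x ∈ pre, x ≤ m) →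
      (∀ t ∈ th, pvRunOf l t) →
      (∀ x ∈ pre, (a ≤ x ∧ x ≤ m) ∨ ∃ t ∈ th, x ∈ t) →
      (∀ t ∈ (if (rest.foldl pvGStep (PySem.List.pyRange a (m + 1) 1, th)).1.isEmpty
              then (rest.foldl pvGStep (PySem.List.pyRange a (m + 1) 1, th)).2
              else (rest.foldl pvGStep (PySem.List.pyRange a (m + 1) 1, th)).2
                ++ [(rest.foldl pvGStep (PySem.List.pyRange a (m + 1) 1, th)).1]),
        pvRunOf l t) ∧
      (∀ x ∈ l, ∃ t ∈ (if (rest.foldl pvGStep (PySem.List.pyRange a (m + 1) 1, th)).1.isEmpty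
              then (rest.foldl pvGStep (PySem.List.pyRange a (m + 1) 1, th)).2
              else (rest.foldl pvGStep (PySem.List.pyRange a (m + 1) 1, th)).2
                ++ [(rest.foldl pvGStep (PySem.List.pyRange a (m + 1) 1, th)).1]),
        x ∈ t) := by
  intro rest
  induction rest with
  | nil =>
    intro pre a m th hl ham hmpre hrun hnotl hle hth hcov
    simp only [List.foldl_nil, pv_pyRange_isEmpty_false a m ham, Bool.false_eq_true,
      if_false]
    constructor
    · intro t ht
      rcases List.mem_append.1 ht with h | h
      · exact hth t h
      · rw [List.mem_singleton] at h
        subst h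
        refine ⟨a, m, ham, rfl, fun x hx1 hx2 => hrun x hx1 hx2, hnotl, ?_⟩
        intro hmem
        rw [hl, List.append_nil] at hmem
        have := hle _ hmem
        omega
    · intro x hx
      have hxpre : x ∈ pre := by rwa [hl, List.append_nil] at hx
      rcases hcov x hxpre with ⟨h1, h2⟩ | ⟨t, ht, hxt⟩
      · exact ⟨_, List.mem_append.2 (Or.inr (List.mem_singleton.2 rfl)),
          (PySem.List.mem_pyRange_one).2 ⟨h1, by omega⟩⟩
      · exact ⟨t, List.mem_append.2 (Or.inl ht), hxt⟩
  | cons k rest ih =>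
    intro pre a m th hl ham hmpre hrun hnotl hle hth hcov
    -- ordering facts
    have hsplit := hl ▸ hs
    rw [List.pairwise_append] at hsplit
    obtain ⟨hpre, hrest, hcross⟩ := hsplit
    have hmk : m < k := hcross m hmpre k List.mem_cons_self
    have hkl : k ∈ l := by rw [hl]; exact List.mem_append.2 (Or.inr List.mem_cons_self)
    have hlassoc : l = (pre ++ [k]) ++ rest := by rw [hl]; simp
    rw [List.foldl_cons]
    rw [show pvGStep (PySem.List.pyRange a (m + 1) 1, th) k =
        (if (PySem.List.pyRange a (m + 1) 1).isEmpty then ([k], th)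
         else if k - (PySem.List.pyRange a (m + 1) 1).getLastD 0 == 1
         then (PySem.List.pyRange a (m + 1) 1 ++ [k], th)
         else ([k], th ++ [PySem.List.pyRange a (m + 1) 1])) from rfl]
    rw [pv_pyRange_isEmpty_false a m ham, pv_pyRange_getLastD a m ham]
    simp only [Bool.false_eq_true, if_false]
    by_cases hk1 : k - m = 1
    · have hb : (k - m == 1) = true := by simpa using hk1
      rw [if_pos hb]
      have hk : k = m + 1 := by omega
      subst hk
      rw [show PySem.List.pyRange a (m + 1) 1 ++ [m + 1] =
          PySem.List.pyRange a (m + 1 + 1) 1 from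
        (PySem.List.pyRange_one_succ_right (by omega)).symm]
      refine ih (pre ++ [m + 1]) a (m + 1) th hlassoc (by omega)
        (List.mem_append.2 (Or.inr (List.mem_singleton.2 rfl))) ?_ hnotl ?_ hth ?_
      · intro x hx1 hx2
        by_cases hxm : x ≤ m
        · exact hrun x hx1 hxm
        · have : x = m + 1 := by omega
          subst this
          exact hkl
      · intro x hx
        rcases List.mem_append.1 hx with h | h
        · have := hle x h; omega
        · rw [List.mem_singleton] at h; omega
      · intro x hx
        rcases List.mem_append.1 hx with h | h
        · rcases hcov x h with ⟨h1, h2⟩ | ⟨t, ht, hxt⟩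
          · exact Or.inl ⟨h1, by omega⟩
          · exact Or.inr ⟨t, ht, hxt⟩
        · rw [List.mem_singleton] at h
          subst h
          exact Or.inl ⟨by omega, by omega⟩
    · have hb : ¬((k - m == 1) = true) := by simpa using hk1
      rw [if_neg hb]
      have hk2 : m + 2 ≤ k := by omega
      have hkrest : ∀ y ∈ rest, k < y := (List.pairwise_cons.1 hrest).1
      have hprek : ∀ x ∈ pre, x < k := fun x hx => hcross x hx k List.mem_cons_self
      have hBrun : pvRunOf l (PySem.List.pyRange a (m + 1) 1) := by
        refine ⟨a, m, ham, rfl, fun x hx1 hx2 => hrun x hx1 hx2, hnotl, ?_⟩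
        intro hmem
        rw [hl] at hmem
        rcases List.mem_append.1 hmem with h | h
        · have := hle _ h; omega
        · rcases List.mem_cons.1 h with h | h
          · omega
          · have := hkrest _ h; omega
      rw [show ([k] : List Int) = PySem.List.pyRange k (k + 1) 1 from
        (PySem.List.pyRange_one_singleton k).symm]
      refine ih (pre ++ [k]) k k (th ++ [PySem.List.pyRange a (m + 1) 1]) hlassoc
        (le_refl k) (List.mem_append.2 (Or.inr (List.mem_singleton.2 rfl))) ?_ ?_ ?_ ?_ ?_
      · intro x hx1 hx2
        have : x = k := by omega
        subst this
        exact hkl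
      · intro hmem
        rw [hl] at hmem
        rcases List.mem_append.1 hmem with h | h
        · have := hle _ h; omega
        · rcases List.mem_cons.1 h with h | h
          · omega
          · have := hkrest _ h; omega
      · intro x hx
        rcases List.mem_append.1 hx with h | h
        · have := hprek _ h; omega
        · rw [List.mem_singleton] at h; omega
      · intro t ht
        rcases List.mem_append.1 ht with h | h
        · exact hth t h
        · rw [List.mem_singleton] at h
          subst h
          exact hBrun
      · intro x hx
        rcases List.mem_append.1 hx with h | h
        · rcases hcov x h with ⟨h1, h2⟩ | ⟨t, ht, hxt⟩
          · exact Or.inr ⟨PySem.List.pyRange a (m + 1) 1,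
              List.mem_append.2 (Or.inr (List.mem_singleton.2 rfl)),
              (PySem.List.mem_pyRange_one).2 ⟨h1, by omega⟩⟩
          · exact Or.inr ⟨t, List.mem_append.2 (Or.inl ht), hxt⟩
        · rw [List.mem_singleton] at h
          subst h
          exact Or.inl ⟨le_refl _, le_refl _⟩

theorem pv_third_runs (l : List Int) (hs : l.Pairwise (· < ·)) :
    (∀ t ∈ pvThird l, pvRunOf l t) ∧ (∀ x ∈ l, ∃ t ∈ pvThird l, x ∈ t) := by
  cases l with
  | nil => constructor <;> intro t ht <;> simp [pvThird, pvGStep] at ht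
  | cons k rest =>
    have hkrest : ∀ y ∈ rest, k < y := (List.pairwise_cons.1 hs).1
    unfold pvThird
    rw [List.foldl_cons]
    rw [show pvGStep ([], []) k = (([k] : List Int), ([] : List (List Int))) from rfl]
    rw [show ([k] : List Int) = PySem.List.pyRange k (k + 1) 1 from
      (PySem.List.pyRange_one_singleton k).symm]
    exact pv_g_aux (k :: rest) hs rest [k] k k [] rfl (le_refl k)
      (List.mem_singleton.2 rfl)
      (fun x hx1 hx2 => by
        have : x = k := by omega
        subst this
        exact List.mem_cons_self)
      (fun hmem => by
        rcases List.mem_cons.1 hmem with h | h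
        · omega
        · have := hkrest _ h; omega)
      (fun x hx => by rw [List.mem_singleton] at hx; omega)
      (fun t ht => absurd ht (List.not_mem_nil))
      (fun x hx => Or.inl (by rw [List.mem_singleton] at hx; omega))

-- ---- min / max of a run ----

theorem pv_min_pyRange (a b : Int) (h : a ≤ b) :
    (PySem.List.min? (PySem.List.pyRange a (b + 1) 1) (fun x => x)).getD 0 = a := by
  cases hm : PySem.List.min? (PySem.List.pyRange a (b + 1) 1) (fun x => x) with
  | none =>
    have := (PySem.List.min?_eq_none_iff _ _).1 hm
    rw [PySem.List.pyRange_one_cons (by omega)] at this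
    exact absurd this (by simp)
  | some m =>
    have hmem := PySem.List.min?_mem hm
    have hle := PySem.List.min?_isMin hm a ((PySem.List.mem_pyRange_one).2 ⟨le_refl a, by omega⟩)
    rw [PySem.List.mem_pyRange_one] at hmem
    simp only [Option.getD_some]
    omega

theorem pv_max_pyRange (a b : Int) (h : a ≤ b) :
    (PySem.List.max? (PySem.List.pyRange a (b + 1) 1) (fun x => x)).getD 0 = b := by
  cases hm : PySem.List.max? (PySem.List.pyRange a (b + 1) 1) (fun x => x) with
  | none =>
    have := (PySem.List.max?_eq_none_iff _ _).1 hm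
    rw [PySem.List.pyRange_one_cons (by omega)] at this
    exact absurd this (by simp)
  | some m =>
    have hmem := PySem.List.max?_mem hm
    have hle := PySem.List.max?_isMax hm b ((PySem.List.mem_pyRange_one).2 ⟨h, by omega⟩)
    rw [PySem.List.mem_pyRange_one] at hmem
    simp only [Option.getD_some]
    omega

-- ---- the flip fold, pointwise ----

theorem pv_flipFold_length (c : Char) (j : Int) (first : PySem.Dict Int Int) :
    ∀ (third : List (List Int)) (r : List Char),
      (pvFlipFold c j first third r).length = r.length := by
  intro third
  induction third with
  | nil => intro r; rfl
  | cons t ts ih =>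
    intro r
    unfold pvFlipFold at ih ⊢
    rw [List.foldl_cons]
    rw [ih]
    split
    · exact pv_flip_length c r _ _
    · rfl

theorem pv_flipFold_keeps_c (c : Char) (j : Int) (first : PySem.Dict Int Int) :
    ∀ (third : List (List Int)) (r : List Char) (i : Nat),
      (∀ t ∈ third, 0 ≤ (PySem.List.min? t (fun x => x)).getD 0) →
      r.getD i '.' = c →
      (pvFlipFold c j first third r).getD i '.' = c := by
  intro third
  induction third with
  | nil => intro r i _ h; exact h
  | cons t ts ih =>
    intro r i hm h
    unfold pvFlipFold at ih ⊢
    rw [List.foldl_cons]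
    refine ih _ i (fun u hu => hm u (List.mem_cons_of_mem _ hu)) ?_
    split
    · rw [pv_flip_getD c r _ _ (hm t List.mem_cons_self) i]
      split
      · rfl
      · exact h
    · exact h

theorem pv_flipFold_getD_of (c : Char) (j : Int) (first : PySem.Dict Int Int) :
    ∀ (third : List (List Int)) (r : List Char) (i : Nat),
      (∀ t ∈ third, 0 ≤ (PySem.List.min? t (fun x => x)).getD 0) →
      i < r.length →
      (∃ t ∈ third, pvCond c j first t = true ∧
        (PySem.List.min? t (fun x => x)).getD 0 ≤ (i : Int) ∧
        (i : Int) ≤ (PySem.List.max? t (fun x => x)).getD 0) →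
      (pvFlipFold c j first third r).getD i '.' = c := by
  intro third
  induction third with
  | nil => intro r i _ _ h; exact absurd h (by simp)
  | cons t ts ih =>
    intro r i hm hlen h
    obtain ⟨u, hu, hcond, h1, h2⟩ := h
    rcases List.mem_cons.1 hu with rfl | hu'
    · unfold pvFlipFold
      rw [List.foldl_cons]
      refine pv_flipFold_keeps_c c j first ts _ i
        (fun v hv => hm v (List.mem_cons_of_mem _ hv)) ?_
      rw [if_pos hcond, pv_flip_getD c r _ _ (hm u List.mem_cons_self) i,
        if_pos ⟨h1, by omega, hlen⟩]
    · unfold pvFlipFold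
      rw [List.foldl_cons]
      refine ih _ i (fun v hv => hm v (List.mem_cons_of_mem _ hv)) ?_
        ⟨u, hu', hcond, h1, h2⟩
      split
      · rw [pv_flip_length]; exact hlen
      · exact hlen

theorem pv_flipFold_getD_not (c : Char) (j : Int) (first : PySem.Dict Int Int) :
    ∀ (third : List (List Int)) (r : List Char) (i : Nat),
      (∀ t ∈ third, 0 ≤ (PySem.List.min? t (fun x => x)).getD 0) →
      (¬ ∃ t ∈ third, pvCond c j first t = true ∧
        (PySem.List.min? t (fun x => x)).getD 0 ≤ (i : Int) ∧
        (i : Int) ≤ (PySem.List.max? t (fun x => x)).getD 0) →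
      (pvFlipFold c j first third r).getD i '.' = r.getD i '.' := by
  intro third
  induction third with
  | nil => intro r i _ _; rfl
  | cons t ts ih =>
    intro r i hm h
    unfold pvFlipFold at ih ⊢
    simp only [List.foldl_cons]
    have hts : ¬ ∃ u ∈ ts, pvCond c j first u = true ∧
        (PySem.List.min? u (fun x => x)).getD 0 ≤ (i : Int) ∧
        (i : Int) ≤ (PySem.List.max? u (fun x => x)).getD 0 := by
      intro ⟨u, hu, hc⟩
      exact h ⟨u, List.mem_cons_of_mem _ hu, hc⟩
    rw [ih _ i (fun v hv => hm v (List.mem_cons_of_mem _ hv)) hts]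
    split
    · next hcond =>
      rw [pv_flip_getD c r _ _ (hm t List.mem_cons_self) i]
      rw [if_neg ?_]
      intro ⟨hx1, hx2, _⟩
      exact h ⟨t, List.mem_cons_self, hcond, hx1, by omega⟩
    · rfl

-- ---- getElem / getD bridge ----

theorem pv_getD_eq_getElem (l : List Char) (n : Nat) (h : n < l.length) :
    l.getD n '.' = l[n] := by
  simp [List.getD_eq_getElem?_getD, List.getElem?_eq_getElem h]

-- ---- the main step equality ----

theorem pvDirB_eq (c o : Char) (j : Int) (r : List Char) (s : Int) :
    pvDirB c o j r s =
      if (decide (0 ≤ pvScanB r o s 9 (j + s)) && decide (pvScanB r o s 9 (j + s) < 8))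
          && (r.getD (pvScanB r o s 9 (j + s)).toNat '.' == c)
      then pvFlipRange c r (min j (pvScanB r o s 9 (j + s)) + 1)
             (max j (pvScanB r o s 9 (j + s)))
      else r := rfl

theorem pv_dirB_length (c o : Char) (j : Int) (r : List Char) (s : Int) :
    (pvDirB c o j r s).length = r.length := by
  rw [pvDirB_eq]
  split
  · exact pv_flip_length c r _ _
  · rfl

theorem pv_step_eq (res : List Char) (h8 : res.length = 8) (c o : Char) (hco : c ≠ o)
    (j : Int) (h0 : 0 ≤ j) (hj : j < 8) :
    pvStepA res c o j = pvStepB res c o j := by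
  rw [pvStepA_eq, pvStepB_eq, if_neg (by omega : ¬ j < 0)]
  set r := res.set j.toNat c with hrdef
  have hrlen : r.length = 8 := by rw [hrdef]; simpa using h8
  have hjc : r.getD j.toNat '.' = c := by
    rw [hrdef, pv_getD_set, if_pos ⟨rfl, by omega⟩]
  -- characterizations of the snapshot data
  have hT : ∀ x : Int, (pvTruthyOptInt (PySem.Dict.get? (pvFirst r c) x) = true) ↔
      (0 ≤ x ∧ x < 8 ∧ r.getD x.toNat '.' = c) := by
    intro x
    rw [pv_first_truthy]
    constructor
    · rintro ⟨i, hlt, rfl, hgc⟩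
      refine ⟨by omega, by omega, ?_⟩
      rw [Int.toNat_natCast, pv_getD_eq_getElem r i hlt]
      exact hgc
    · rintro ⟨hx0, hx8, hgd⟩
      refine ⟨x.toNat, by omega, by omega, ?_⟩
      rw [← pv_getD_eq_getElem r x.toNat (by omega)]
      exact hgd
  have hmemL : ∀ x : Int, (x ∈ pvSecond r o) ↔
      (0 ≤ x ∧ x < 8 ∧ r.getD x.toNat '.' = o) := by
    intro x
    rw [pv_second_mem]
    constructor
    · rintro ⟨i, hlt, rfl, hgc⟩
      refine ⟨by omega, by omega, ?_⟩
      rw [Int.toNat_natCast, pv_getD_eq_getElem r i hlt]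
      exact hgc
    · rintro ⟨hx0, hx8, hgd⟩
      refine ⟨x.toNat, by omega, by omega, ?_⟩
      rw [← pv_getD_eq_getElem r x.toNat (by omega)]
      exact hgd
  have hjo : (j : Int) ∉ pvSecond r o := by
    rw [hmemL]
    rintro ⟨_, _, hh⟩
    exact hco (hjc ▸ hh ▸ rfl)
  -- runs
  obtain ⟨hruns, hcover⟩ := pv_third_runs (pvSecond r o) (pv_second_sorted r o)
  have hm : ∀ t ∈ pvThird (pvSecond r o),
      0 ≤ (PySem.List.min? t (fun x => x)).getD 0 := by
    intro t ht
    obtain ⟨a, b, hab, htr, hmem, _, _⟩ := hruns t ht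
    rw [htr, pv_min_pyRange a b hab]
    have := (hmemL a).1 (hmem a (le_refl a) (by omega))
    omega
  -- scans
  obtain ⟨hL1, hL2, hL3, hL4⟩ := pv_scanL r o 9 (j + -1) (by omega) (by omega) (by omega)
  obtain ⟨hR1, hR2, hR3, hR4⟩ := pv_scanR r o 9 (j + 1) (by omega) (by omega) (by omega)
  set L := pvScanB r o (-1) 9 (j + -1) with hLdef
  set R := pvScanB r o 1 9 (j + 1) with hRdef
  -- B, first direction
  have hrL : pvDirB c o j r (-1) =
      if (decide (0 ≤ L) && decide (L < 8)) && (r.getD L.toNat '.' == c)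
      then pvFlipRange c r (L + 1) j else r := by
    rw [pvDirB_eq, ← hLdef,
      min_eq_right (by omega : L ≤ j), max_eq_left (by omega : L ≤ j)]
  have hrLgetD : ∀ i : Nat, (pvDirB c o j r (-1)).getD i '.' =
      if (0 ≤ L ∧ r.getD L.toNat '.' = c) ∧ (L + 1 ≤ (i : Int) ∧ (i : Int) < j ∧ i < 8)
      then c else r.getD i '.' := by
    intro i
    rw [hrL]
    split
    · next hg =>
      simp only [Bool.and_eq_true, decide_eq_true_eq, beq_iff_eq] at hg
      rw [pv_flip_getD c r _ _ (by omega) i]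
      by_cases hrange : L + 1 ≤ (i : Int) ∧ (i : Int) < j ∧ i < r.length
      · rw [if_pos hrange, if_pos ⟨⟨hg.1.1, hg.2⟩, hrange.1, hrange.2.1, by omega⟩]
      · rw [if_neg hrange, if_neg (by intro hx; exact hrange ⟨hx.2.1, hx.2.2.1, by omega⟩)]
    · next hg =>
      simp only [Bool.and_eq_true, decide_eq_true_eq, beq_iff_eq, not_and] at hg
      rw [if_neg]
      rintro ⟨⟨w1, w2⟩, _⟩
      exact hg ⟨w1, by omega⟩ w2
  have hrLlen : (pvDirB c o j r (-1)).length = 8 := by rw [pv_dirB_length]; exact hrlen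
  have hagree : ∀ x : Int, j < x →
      r.getD x.toNat '.' = (pvDirB c o j r (-1)).getD x.toNat '.' := by
    intro x hx
    rw [hrLgetD x.toNat, if_neg]
    rintro ⟨_, _, hlt, _⟩
    omega
  have hscan2 : pvScanB (pvDirB c o j r (-1)) o 1 9 (j + 1) = R := by
    rw [hRdef]
    exact (pv_scanR_congr r (pvDirB c o j r (-1)) o j hagree 9 (j + 1) (by omega)).symm
  -- B, second direction
  have hstepB : ∀ i : Nat, (pvDirB c o j (pvDirB c o j r (-1)) 1).getD i '.' =
      if (R < 8 ∧ r.getD R.toNat '.' = c) ∧ (j + 1 ≤ (i : Int) ∧ (i : Int) < R ∧ i < 8)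
      then c else (pvDirB c o j r (-1)).getD i '.' := by
    intro i
    rw [pvDirB_eq, hscan2, min_eq_left (by omega : j ≤ R), max_eq_right (by omega : j ≤ R)]
    have hRread : (pvDirB c o j r (-1)).getD R.toNat '.' = r.getD R.toNat '.' :=
      (hagree R (by omega)).symm
    split
    · next hg =>
      simp only [Bool.and_eq_true, decide_eq_true_eq, beq_iff_eq] at hg
      rw [hRread] at hg
      rw [pv_flip_getD c _ _ _ (by omega) i, hrLlen]
      by_cases hrange : j + 1 ≤ (i : Int) ∧ (i : Int) < R ∧ i < 8
      · rw [if_pos hrange, if_pos ⟨⟨hg.1.2, hg.2⟩, hrange⟩]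
      · rw [if_neg hrange, if_neg (by intro hx; exact hrange hx.2)]
    · next hg =>
      simp only [Bool.and_eq_true, decide_eq_true_eq, beq_iff_eq, not_and] at hg
      rw [hRread] at hg
      rw [if_neg]
      rintro ⟨⟨w1, w2⟩, _⟩
      exact hg ⟨by omega, w1⟩ w2
  -- reusable: the right-scan stops exactly at the end of a maximal run starting at j+1
  have hRb : ∀ a b : Int, a = j + 1 → a ≤ b →
      (∀ x : Int, a ≤ x → x ≤ b → x ∈ pvSecond r o) → (b + 1) ∉ pvSecond r o →
      R = b + 1 := by
    intro a b ha hab hmem hnotb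
    have hbl := (hmemL b).1 (hmem b (by omega) (le_refl b))
    by_cases h1 : R ≤ b
    · exfalso
      have hRl := (hmemL R).1 (hmem R (by omega) h1)
      rcases hR4 with h | h
      · omega
      · exact h hRl.2.2
    · by_cases h2 : b + 1 < R
      · exfalso
        exact hnotb ((hmemL (b + 1)).2 ⟨by omega, by omega, hR3 (b + 1) (by omega) h2⟩)
      · omega
  -- and the left scan at the start of a maximal run ending at j-1
  have hLa : ∀ a b : Int, b = j - 1 → a ≤ b →
      (∀ x : Int, a ≤ x → x ≤ b → x ∈ pvSecond r o) → (a - 1) ∉ pvSecond r o →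
      L = a - 1 := by
    intro a b hb hab hmem hnota
    have hal := (hmemL a).1 (hmem a (le_refl a) (by omega))
    by_cases h1 : a ≤ L
    · exfalso
      have hLl := (hmemL L).1 (hmem L h1 (by omega))
      rcases hL4 with h | h
      · omega
      · exact h hLl.2.2
    · by_cases h2 : L < a - 1
      · exfalso
        exact hnota ((hmemL (a - 1)).2 ⟨by omega, by omega,
          hL3 (a - 1) (by omega) h2⟩)
      · omega
  -- the bridge: A's flipped blocks are exactly B's two flip ranges
  have hbridge : ∀ i : Nat, i < 8 →
      ((∃ t ∈ pvThird (pvSecond r o), pvCond c j (pvFirst r c) t = true ∧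
          (PySem.List.min? t (fun x => x)).getD 0 ≤ (i : Int) ∧
          (i : Int) ≤ (PySem.List.max? t (fun x => x)).getD 0) ↔
        (((R < 8 ∧ r.getD R.toNat '.' = c) ∧ (j + 1 ≤ (i : Int) ∧ (i : Int) < R)) ∨
         ((0 ≤ L ∧ r.getD L.toNat '.' = c) ∧ (L + 1 ≤ (i : Int) ∧ (i : Int) < j)))) := by
    intro i hi8
    constructor
    · rintro ⟨t, ht, hcond, hi1, hi2⟩
      obtain ⟨a, b, hab, htr, hmem, hnota, hnotb⟩ := hruns t ht
      rw [htr, pv_min_pyRange a b hab] at hi1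
      rw [htr, pv_max_pyRange a b hab] at hi2
      rw [show pvCond c j (pvFirst r c) t =
          ((j == (PySem.List.min? t (fun x => x)).getD 0 - 1 ||
            j == (PySem.List.max? t (fun x => x)).getD 0 + 1)
            && pvTruthyOptInt (PySem.Dict.get? (pvFirst r c)
                ((PySem.List.min? t (fun x => x)).getD 0 - 1))
            && pvTruthyOptInt (PySem.Dict.get? (pvFirst r c)
                ((PySem.List.max? t (fun x => x)).getD 0 + 1))) from rfl,
        htr, pv_min_pyRange a b hab, pv_max_pyRange a b hab] at hcond
      simp only [Bool.and_eq_true, Bool.or_eq_true, beq_iff_eq] at hcond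
      obtain ⟨⟨hadj, hTa⟩, hTb⟩ := hcond
      rw [hT] at hTa hTb
      rcases hadj with hja | hjb
      · -- a = j + 1 : right-hand run
        have hRb' := hRb a b (by omega) hab hmem hnotb
        left
        refine ⟨⟨by omega, ?_⟩, by omega, by omega⟩
        rw [show R = b + 1 from hRb']
        exact hTb.2.2
      · -- b = j - 1 : left-hand run
        have hLa' := hLa a b (by omega) hab hmem hnota
        right
        refine ⟨⟨by omega, ?_⟩, by omega, by omega⟩
        rw [show L = a - 1 from hLa']
        exact hTa.2.2
    · rintro (⟨⟨hR8, hRc⟩, hi1, hi2⟩ | ⟨⟨hL0, hLc⟩, hi1, hi2⟩)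
      · -- right flip: the run [j+1, R-1]
        have hj1 : (j + 1 : Int) ∈ pvSecond r o :=
          (hmemL (j + 1)).2 ⟨by omega, by omega, hR3 (j + 1) (le_refl _) (by omega)⟩
        obtain ⟨t, ht, hj1t⟩ := hcover (j + 1) hj1
        obtain ⟨a, b, hab, htr, hmem, hnota, hnotb⟩ := hruns t ht
        rw [htr, PySem.List.mem_pyRange_one] at hj1t
        have haj : a = j + 1 := by
          by_contra hne
          have hjin : (j : Int) ∈ pvSecond r o := hmem j (by omega) (by omega)
          exact hjo hjin
        have hRb' := hRb a b haj (by omega) hmem hnotb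
        refine ⟨t, ht, ?_, ?_, ?_⟩
        · rw [show pvCond c j (pvFirst r c) t =
              ((j == (PySem.List.min? t (fun x => x)).getD 0 - 1 ||
                j == (PySem.List.max? t (fun x => x)).getD 0 + 1)
                && pvTruthyOptInt (PySem.Dict.get? (pvFirst r c)
                    ((PySem.List.min? t (fun x => x)).getD 0 - 1))
                && pvTruthyOptInt (PySem.Dict.get? (pvFirst r c)
                    ((PySem.List.max? t (fun x => x)).getD 0 + 1))) from rfl,
            htr, pv_min_pyRange a b hab, pv_max_pyRange a b hab]
          simp only [Bool.and_eq_true, Bool.or_eq_true, beq_iff_eq]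
          refine ⟨⟨Or.inl (by omega), ?_⟩, ?_⟩
          · rw [hT]
            exact ⟨by omega, by omega, by rw [show a - 1 = j by omega]; exact hjc⟩
          · rw [hT]
            exact ⟨by omega, by omega, by rw [show b + 1 = R by omega]; exact hRc⟩
        · rw [htr, pv_min_pyRange a b hab]; omega
        · rw [htr, pv_max_pyRange a b hab]; omega
      · -- left flip: the run [L+1, j-1]
        have hjm1 : (j - 1 : Int) ∈ pvSecond r o :=
          (hmemL (j - 1)).2 ⟨by omega, by omega, hL3 (j - 1) (by omega) (by omega)⟩
        obtain ⟨t, ht, hjt⟩ := hcover (j - 1) hjm1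
        obtain ⟨a, b, hab, htr, hmem, hnota, hnotb⟩ := hruns t ht
        rw [htr, PySem.List.mem_pyRange_one] at hjt
        have hbj : b = j - 1 := by
          by_contra hne
          have hjin : (j : Int) ∈ pvSecond r o := hmem j (by omega) (by omega)
          exact hjo hjin
        have hLa' := hLa a b hbj (by omega) hmem hnota
        refine ⟨t, ht, ?_, ?_, ?_⟩
        · rw [show pvCond c j (pvFirst r c) t =
              ((j == (PySem.List.min? t (fun x => x)).getD 0 - 1 ||
                j == (PySem.List.max? t (fun x => x)).getD 0 + 1)
                && pvTruthyOptInt (PySem.Dict.get? (pvFirst r c)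
                    ((PySem.List.min? t (fun x => x)).getD 0 - 1))
                && pvTruthyOptInt (PySem.Dict.get? (pvFirst r c)
                    ((PySem.List.max? t (fun x => x)).getD 0 + 1))) from rfl,
            htr, pv_min_pyRange a b hab, pv_max_pyRange a b hab]
          simp only [Bool.and_eq_true, Bool.or_eq_true, beq_iff_eq]
          refine ⟨⟨Or.inr (by omega), ?_⟩, ?_⟩
          · rw [hT]
            exact ⟨by omega, by omega, by rw [show a - 1 = L by omega]; exact hLc⟩
          · rw [hT]
            exact ⟨by omega, by omega, by rw [show b + 1 = j by omega]; exact hjc⟩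
        · rw [htr, pv_min_pyRange a b hab]; omega
        · rw [htr, pv_max_pyRange a b hab]; omega
  -- pointwise equality
  apply List.ext_getElem
  · rw [pv_flipFold_length, pv_dirB_length, pv_dirB_length]
  · intro i h1 h2
    have hi8 : i < 8 := by
      rw [pv_flipFold_length, hrlen] at h1
      exact h1
    rw [← pv_getD_eq_getElem _ i h1, ← pv_getD_eq_getElem _ i h2]
    rw [hstepB i, hrLgetD i]
    by_cases hD : ∃ t ∈ pvThird (pvSecond r o), pvCond c j (pvFirst r c) t = true ∧
        (PySem.List.min? t (fun x => x)).getD 0 ≤ (i : Int) ∧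
        (i : Int) ≤ (PySem.List.max? t (fun x => x)).getD 0
    · rw [pv_flipFold_getD_of c j (pvFirst r c) _ r i hm (by omega) hD]
      rcases (hbridge i hi8).1 hD with ⟨hc1, hc2⟩ | ⟨hc1, hc2⟩
      · rw [if_pos ⟨hc1, hc2.1, hc2.2, hi8⟩]
      · by_cases hCR : (R < 8 ∧ r.getD R.toNat '.' = c) ∧
            (j + 1 ≤ (i : Int) ∧ (i : Int) < R ∧ i < 8)
        · rw [if_pos hCR]
        · rw [if_neg hCR, if_pos ⟨hc1, hc2.1, hc2.2, hi8⟩]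
    · rw [pv_flipFold_getD_not c j (pvFirst r c) _ r i hm hD]
      have hnot : ¬ ((((R < 8 ∧ r.getD R.toNat '.' = c) ∧
            (j + 1 ≤ (i : Int) ∧ (i : Int) < R)) ∨
          ((0 ≤ L ∧ r.getD L.toNat '.' = c) ∧ (L + 1 ≤ (i : Int) ∧ (i : Int) < j)))) :=
        fun h => hD ((hbridge i hi8).2 h)
      have hnCR : ¬ ((R < 8 ∧ r.getD R.toNat '.' = c) ∧
          (j + 1 ≤ (i : Int) ∧ (i : Int) < R ∧ i < 8)) :=
        fun h => hnot (Or.inl ⟨h.1, h.2.1, h.2.2.1⟩)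
      have hnCL : ¬ ((0 ≤ L ∧ r.getD L.toNat '.' = c) ∧
          (L + 1 ≤ (i : Int) ∧ (i : Int) < j ∧ i < 8)) :=
        fun h => hnot (Or.inr ⟨h.1, h.2.1, h.2.2.1⟩)
      rw [if_neg hnCR, if_neg hnCL]

theorem pv_stepB_length (res : List Char) (h8 : res.length = 8) (c o : Char) (j : Int) :
    (pvStepB res c o j).length = 8 := by
  rw [pvStepB_eq, pv_dirB_length, pv_dirB_length]
  simpa using h8

theorem pv_fold_eq : ∀ (l : List Int) (s : Int) (res : List Char),
    (∀ j ∈ l, 0 ≤ j ∧ j < 8) → res.length = 8 →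
    (PySem.List.enumerate l s).foldl
      (fun res p =>
        let c := if PySem.Int.mod p.1 2 == 0 then '*' else 'O'
        let o := if PySem.Int.mod p.1 2 == 0 then 'O' else '*'
        pvStepA res c o p.2) res
    = (PySem.List.enumerate l s).foldl
      (fun res p =>
        let c := if PySem.Int.mod p.1 2 == 0 then '*' else 'O'
        let o := if PySem.Int.mod p.1 2 == 0 then 'O' else '*'
        pvStepB res c o p.2) res := by
  intro l
  induction l with
  | nil => intro s res _ _; simp [PySem.List.enumerate_nil]
  | cons j l ih =>
    intro s res hpre hlen
    have hj := hpre j List.mem_cons_self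
    rw [PySem.List.enumerate_cons, List.foldl_cons, List.foldl_cons]
    by_cases hpar : (PySem.Int.mod s 2 == 0) = true
    · simp only [hpar, if_true]
      rw [pv_step_eq res hlen '*' 'O' (by decide) j hj.1 hj.2]
      exact ih (s + 1) _ (fun x hx => hpre x (List.mem_cons_of_mem _ hx))
        (pv_stepB_length res hlen '*' 'O' j)
    · simp only [Bool.not_eq_true] at hpar
      simp only [hpar, Bool.false_eq_true, if_false]
      rw [pv_step_eq res hlen 'O' '*' (by decide) j hj.1 hj.2]
      exact ih (s + 1) _ (fun x hx => hpre x (List.mem_cons_of_mem _ hx))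
        (pv_stepB_length res hlen 'O' '*' j)

-- ===== VERDICT (by name: the statement is the Claim_ definition above) =====
theorem reversi_row_spec : Claim_equal_reversi_row := by
  intro moves _ hpre
  unfold Spec_reversi_row reversi_row reversi_row_alt
  rw [pv_fold_eq moves 0 (List.replicate 8 '.') hpre (by simp)]
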